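-- pv_equiv track=rewrite | github.com/GoodDonkey/algorithm_study | programmers/prog.py | solution
-- ===== SOURCE A (Python) =====
-- def solution(arr):
--     answer = []
--     one = 0
--     two = 0
--     three = 0
--     for n in arr:
--         if n == 1:
--             one += 1
--         elif n == 2:
--             two += 1
--         elif n == 3:
--             three += 1
--     max_num = max([one, two, three])
--     answer.append(max_num-one)
--     answer.append(max_num-two)
--     answer.append(max_num-three)
--     return answer
-- ===== SOURCE B (Python) =====
-- def solution(arr):
--     s = sorted(x for x in arr if 1 <= x <= 3)
--     def upto(v):
--         # rightmost insertion point of v in sorted s = number of elements <= v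
--         lo, hi = 0, len(s)
--         while lo < hi:
--             mid = (lo + hi) // 2
--             if s[mid] <= v:
--                 lo = mid + 1
--             else:
--                 hi = mid
--         return lo
--     b1, b2 = upto(1), upto(2)
--     counts = [b1, b2 - b1, len(s) - b2]
--     m = max(counts)
--     return [m - c for c in counts]
-- ===== Notes on version B (the rewrite author's own statement) =====
-- stated objective: alternative
-- what changed: Instead of one counting pass with three counters, B filters arr to values in {1,2,3}, sorts the filtered list, and recovers the three counts from two hand-written binary searches (rightmost insertion points of 1 and 2), then subtracts from the max.
import Mathlib
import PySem

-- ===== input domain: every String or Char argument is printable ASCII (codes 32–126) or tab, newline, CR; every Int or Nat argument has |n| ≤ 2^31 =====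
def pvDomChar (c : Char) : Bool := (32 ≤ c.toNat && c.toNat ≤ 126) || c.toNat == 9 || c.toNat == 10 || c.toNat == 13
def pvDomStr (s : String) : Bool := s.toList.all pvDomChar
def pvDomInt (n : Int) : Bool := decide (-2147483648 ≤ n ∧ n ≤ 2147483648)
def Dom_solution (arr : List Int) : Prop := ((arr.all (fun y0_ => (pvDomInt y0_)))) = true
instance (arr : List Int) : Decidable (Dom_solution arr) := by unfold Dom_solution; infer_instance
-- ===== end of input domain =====

-- B replaces A's single counting pass (three counters) by filter-to-{1,2,3} + sort +
-- two hand-written binary searches that recover the counts (objective: alternative).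

-- ===== PORT A =====
-- single pass accumulating the three counters, then max of the three-element list
def countStep (st : Int × Int × Int) (n : Int) : Int × Int × Int :=
  if n == 1 then (st.1 + 1, st.2.1, st.2.2)
  else if n == 2 then (st.1, st.2.1 + 1, st.2.2)
  else if n == 3 then (st.1, st.2.1, st.2.2 + 1)
  else st

def solution (arr : List Int) : List Int :=
  let s := arr.foldl countStep (0, 0, 0)
  let max_num := (PySem.List.max? [s.1, s.2.1, s.2.2] (fun y => y)).getD 0
  [max_num - s.1, max_num - s.2.1, max_num - s.2.2]

-- ===== PORT B =====
-- the while loop of Source B's 'upto': lo/hi binary search for the rightmost insertion point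
def upto (s : List Int) (v : Int) (lo hi : Int) : Int :=
  if h : lo < hi then
    let mid := PySem.Int.floordiv (lo + hi) 2
    match PySem.List.pyGet? s mid with
    | some x => if x ≤ v then upto s v (mid + 1) hi else upto s v lo mid
    | none => lo   -- unreachable: 0 ≤ lo ≤ mid < hi ≤ len s keeps mid in range (Python would raise IndexError)
  else lo
termination_by (hi - lo).toNat
decreasing_by
  · have := PySem.Int.floordiv_two_mid_bounds (le_of_lt h)
    omega
  · have h2 : PySem.Int.floordiv (lo + hi) 2 < hi := by
      rw [PySem.Int.floordiv_lt_iff_lt_mul (by omega)]; omega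
    omega

def solution_alt (arr : List Int) : List Int :=
  let s := PySem.List.sorted (arr.filter (fun x => decide (1 ≤ x ∧ x ≤ 3))) (fun y => y) false
  let b1 := upto s 1 0 (s.length : Int)
  let b2 := upto s 2 0 (s.length : Int)
  let counts : List Int := [b1, b2 - b1, (s.length : Int) - b2]
  let m := (PySem.List.max? counts (fun y => y)).getD 0
  counts.map (fun c => m - c)

-- ===== PRECONDITION & SPEC =====
def Spec_solution (arr : List Int) (out : List Int) : Prop := out = solution_alt arr
instance (arr : List Int) (out : List Int) : Decidable (Spec_solution arr out) := by unfold Spec_solution; infer_instance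

-- ===== CLAIM (what is proved, stated in full; the proofs are below) =====
def Claim_equal_solution : Prop := ∀ (arr : List Int), Dom_solution arr → Spec_solution arr (solution arr)

-- ===== LEMMAS AND PROOFS =====

-- A's fold computes the three counts
theorem solution_foldl_counts (arr : List Int) (a b c : Int) :
    arr.foldl countStep (a, b, c)
    = (a + (arr.count 1 : Int), b + (arr.count 2 : Int), c + (arr.count 3 : Int)) := by
  induction arr generalizing a b c with
  | nil => simp
  | cons x t ih =>
    simp only [List.foldl_cons]
    by_cases h1 : x = 1
    · subst h1
      rw [show countStep (a, b, c) 1 = (a + 1, b, c) by simp [countStep], ih]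
      simp; ring
    · by_cases h2 : x = 2
      · subst h2
        rw [show countStep (a, b, c) 2 = (a, b + 1, c) by simp [countStep], ih]
        simp; ring
      · by_cases h3 : x = 3
        · subst h3
          rw [show countStep (a, b, c) 3 = (a, b, c + 1) by simp [countStep], ih]
          simp; ring
        · rw [show countStep (a, b, c) x = (a, b, c) by simp [countStep, h1, h2, h3], ih]
          simp [h1, h2, h3]

-- a list whose indices split at n between ≤ v and > v has exactly n elements ≤ v
theorem countP_le_of_split (s : List Int) (v : Int) (n : Nat) (hn : n ≤ s.length)
    (hlo : ∀ i : Nat, (hi : i < s.length) → i < n → s[i] ≤ v)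
    (hhi : ∀ i : Nat, (hi : i < s.length) → n ≤ i → v < s[i]) :
    s.countP (fun x => decide (x ≤ v)) = n := by
  have hsplit : s = s.take n ++ s.drop n := (List.take_append_drop n s).symm
  rw [hsplit, List.countP_append]
  have h1 : (s.take n).countP (fun x => decide (x ≤ v)) = n := by
    rw [List.countP_eq_length.mpr, List.length_take_of_le hn]
    intro x hx
    obtain ⟨i, hi, rfl⟩ := List.mem_iff_getElem.mp hx
    have hilen : i < s.length := lt_of_lt_of_le (by simpa [hn] using hi) hn
    have : (s.take n)[i] = s[i] := List.getElem_take
    rw [this]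
    simpa using hlo i hilen (by simpa [hn] using hi)
  have h2 : (s.drop n).countP (fun x => decide (x ≤ v)) = 0 := by
    rw [List.countP_eq_zero]
    intro x hx
    obtain ⟨i, hi, rfl⟩ := List.mem_iff_getElem.mp hx
    have hdl : (s.drop n).length = s.length - n := List.length_drop
    have hilen : n + i < s.length := by omega
    have : (s.drop n)[i] = s[n + i]'hilen := by simp [List.getElem_drop]
    rw [this]
    simpa using not_le.mpr (hhi (n + i) hilen (by omega))
  omega

-- the binary search returns the number of elements ≤ v, given the loop invariant
theorem upto_spec (s : List Int) (v : Int) (hs : s.Pairwise (· ≤ ·)) :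
    ∀ (k : Nat) (lo hi : Int), (hi - lo).toNat = k → 0 ≤ lo → lo ≤ hi → hi ≤ s.length →
    (∀ i : Nat, (h : i < s.length) → (i : Int) < lo → s[i] ≤ v) →
    (∀ i : Nat, (h : i < s.length) → hi ≤ (i : Int) → v < s[i]) →
    upto s v lo hi = (s.countP (fun x => decide (x ≤ v)) : Int) := by
  intro k
  induction k using Nat.strong_induction_on with
  | _ k ih =>
    intro lo hi hk hlo0 hle hhilen hpre hpost
    rw [upto]
    by_cases h : lo < hi
    · simp only [h, dif_pos]
      have hmid := PySem.Int.floordiv_two_mid_bounds hle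
      have hmidlt : PySem.Int.floordiv (lo + hi) 2 < hi := by
        rw [PySem.Int.floordiv_lt_iff_lt_mul (by omega)]; omega
      set mid := PySem.Int.floordiv (lo + hi) 2 with hmiddef
      have hmidrange : mid.toNat < s.length := by omega
      have hget : PySem.List.pyGet? s mid = some (s[mid.toNat]'hmidrange) := by
        have hcast : mid = ((mid.toNat : Nat) : Int) := by omega
        conv_lhs => rw [hcast]
        rw [PySem.List.pyGet?_natCast, List.getElem?_eq_getElem hmidrange]
      rw [hget]
      simp only
      by_cases hle' : s[mid.toNat] ≤ v
      · rw [if_pos hle']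
        refine ih (hi - (mid + 1)).toNat (by omega) (mid + 1) hi (rfl) (by omega) (by omega) hhilen ?_ hpost
        intro i hilen hilt
        rcases List.pairwise_iff_getElem.mp hs with hpw
        by_cases hcase : i < mid.toNat
        · exact le_trans (hpw i mid.toNat hilen hmidrange hcase) hle'
        · have : i = mid.toNat := by omega
          subst this; exact hle'
      · rw [if_neg hle']
        refine ih (mid - lo).toNat (by omega) lo mid (rfl) hlo0 (by omega) (by omega) hpre ?_
        intro i hilen hge
        rcases List.pairwise_iff_getElem.mp hs with hpw
        by_cases hcase : mid.toNat < i
        · exact lt_of_lt_of_le (not_le.mp hle') (hpw mid.toNat i hmidrange hilen hcase)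
        · have : i = mid.toNat := by omega
          subst this; exact not_le.mp hle'
    · simp only [h, dif_neg, not_false_iff]
      have hlohi : lo = hi := by omega
      subst hlohi
      have := countP_le_of_split s v lo.toNat (by omega)
        (fun i hi1 hi2 => hpre i hi1 (by omega))
        (fun i hi1 hi2 => hpost i hi1 (by omega))
      omega

-- counts of 1,2,3 determine countP (≤1), countP (≤2) and the length, on a {1,2,3}-valued list
theorem tri_counts (s : List Int) (h : ∀ x ∈ s, 1 ≤ x ∧ x ≤ 3) :
    s.countP (fun x => decide (x ≤ 1)) = s.count 1 ∧
    s.countP (fun x => decide (x ≤ 2)) = s.count 1 + s.count 2 ∧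
    s.length = s.count 1 + s.count 2 + s.count 3 := by
  induction s with
  | nil => simp
  | cons x t ih =>
    have hx := h x (List.mem_cons_self)
    have ht := ih (fun y hy => h y (List.mem_cons_of_mem x hy))
    have hx123 : x = 1 ∨ x = 2 ∨ x = 3 := by omega
    rcases hx123 with rfl | rfl | rfl <;>
      simp [ht.1, ht.2.1, ht.2.2] <;> omega

-- ===== VERDICT (by name: the statement is the Claim_ definition above) =====
theorem solution_spec : Claim_equal_solution := by
  intro arr _
  unfold Spec_solution solution solution_alt
  set f := arr.filter (fun x => decide (1 ≤ x ∧ x ≤ 3)) with hf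
  set s := PySem.List.sorted f (fun y => y) false with hsdef
  have hperm : s.Perm f := PySem.List.sorted_perm f (fun y => y) false
  have hpw : s.Pairwise (· ≤ ·) := by
    have := PySem.List.sorted_pairwise f (fun y => y)
    simpa using this
  have hmem : ∀ x ∈ s, 1 ≤ x ∧ x ≤ 3 := by
    intro x hx
    have : x ∈ f := hperm.mem_iff.mp hx
    simpa using (List.mem_filter.mp this).2
  -- counts in s are counts in arr
  have hc : ∀ k : Int, 1 ≤ k → k ≤ 3 → s.count k = arr.count k := by
    intro k h1 h3
    rw [hperm.count_eq, hf, List.count_filter (by simp; omega)]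
  obtain ⟨ht1, ht2, ht3⟩ := tri_counts s hmem
  have hb1 : upto s 1 0 (s.length : Int) = (s.count 1 : Int) := by
    rw [upto_spec s 1 hpw (s.length : Int).toNat 0 (s.length) (by omega) le_rfl (by omega) le_rfl
      (by intro i h hi; omega) (by intro i h hi; omega), ht1]
  have hb2 : upto s 2 0 (s.length : Int) = ((s.count 1 + s.count 2 : Nat) : Int) := by
    rw [upto_spec s 2 hpw (s.length : Int).toNat 0 (s.length) (by omega) le_rfl (by omega) le_rfl
      (by intro i h hi; omega) (by intro i h hi; omega), ht2]
  rw [solution_foldl_counts]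
  simp only [hb1, hb2, hc 1 (by omega) (by omega), hc 2 (by omega) (by omega)]
  have hlen : (s.length : Int) = (arr.count 1 : Int) + arr.count 2 + arr.count 3 := by
    rw [ht3]; push_cast [hc 1 (by omega) (by omega), hc 2 (by omega) (by omega), hc 3 (by omega) (by omega)]; ring
  simp only [List.map]
  push_cast
  rw [hlen]
  norm_num
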